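-- pv_equiv track=rewrite | github.com/GeonKim94/DeepHOPE | python/VIT/datas/TomoLoader.py | assign_same_values_for_similar_prefixes
-- ===== SOURCE A (Python) =====
-- def assign_same_values_for_similar_prefixes(dictionary):
--     prefix_to_idx = {}
--     new_dict = {}
--     next_idx = 0
--
--     for key in sorted(dictionary.keys()):
--         prefix = key[:2]
--         if prefix not in prefix_to_idx:
--             prefix_to_idx[prefix] = next_idx
--             next_idx += 1
--         new_dict[key] = prefix_to_idx[prefix]
--
--     return new_dict
-- ===== SOURCE B (Python) =====
-- def assign_same_values_for_similar_prefixes(dictionary):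
--     groups = {}
--     for key in dictionary:
--         groups.setdefault(key[:2], []).append(key)
--     new_dict = {}
--     for idx, prefix in enumerate(sorted(groups)):
--         for key in sorted(groups[prefix]):
--             new_dict[key] = idx
--     return new_dict
-- ===== Notes on version B (the rewrite author's own statement) =====
-- stated objective: alternative
-- what changed: A sorts all keys once and numbers prefixes with a stateful counter during a single sorted pass; B never does a global key sort: it buckets the keys by 2-char prefix in one grouping pass, sorts only the distinct prefixes and each bucket separately, and emits each bucket with its prefix's enumeration index (correct because 2-char truncation is monotone, so concatenating the sorted buckets in prefix order reproduces the globally sorted key order).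
import Mathlib
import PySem

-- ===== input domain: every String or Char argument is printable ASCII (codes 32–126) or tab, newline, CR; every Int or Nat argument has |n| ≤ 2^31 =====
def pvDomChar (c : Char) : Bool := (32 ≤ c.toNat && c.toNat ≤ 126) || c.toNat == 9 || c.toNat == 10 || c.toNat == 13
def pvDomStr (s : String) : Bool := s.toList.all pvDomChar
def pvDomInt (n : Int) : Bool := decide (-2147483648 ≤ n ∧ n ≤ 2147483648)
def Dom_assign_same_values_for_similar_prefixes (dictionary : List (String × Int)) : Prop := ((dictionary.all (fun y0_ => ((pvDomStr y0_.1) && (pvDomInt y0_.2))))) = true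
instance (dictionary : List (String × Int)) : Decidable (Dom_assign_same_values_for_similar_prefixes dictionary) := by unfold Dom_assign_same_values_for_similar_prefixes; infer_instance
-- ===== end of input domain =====

-- B replaces A's global key sort + stateful first-appearance counter by bucketing the keys by
-- 2-char prefix in one pass and sorting only the distinct prefixes and each bucket (correct
-- because 2-char truncation is monotone for lexicographic order); return values are proved equal.

-- key[:2] (shared trivial helper: the 2-character prefix of a key)
def pvPref (k : String) : String := PySem.Str.slice k none (some 2)

-- ===== PORT A =====
-- one iteration of A's for-loop over the state (prefix_to_idx, new_dict, next_idx);
-- prefix_to_idx[prefix] is read with getD 0: the key was just ensured present, so no KeyError is reachable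
def pvStepA (s : PySem.Dict String Int × PySem.Dict String Int × Int) (key : String) :
    PySem.Dict String Int × PySem.Dict String Int × Int :=
  let prefix_ := pvPref key
  let pti := if s.1.contains prefix_ then s.1 else s.1.insert prefix_ s.2.2
  let n := if s.1.contains prefix_ then s.2.2 else s.2.2 + 1
  let nd := s.2.1.insert key (pti.getD prefix_ 0)
  (pti, nd, n)

def assign_same_values_for_similar_prefixes (dictionary : List (String × Int)) : List (String × Int) :=
  ((PySem.List.sorted (PySem.Dict.ofList dictionary).keys (fun k => k)).foldl
      pvStepA (PySem.Dict.empty, PySem.Dict.empty, 0)).2.1.items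

-- ===== PORT B =====
-- the grouping loop: 'groups.setdefault(key[:2], []).append(key)' — the net effect of
-- setdefault-then-append on the dict is exactly d[p] = d.get(p, []) + [key] with p's original
-- position kept, i.e. Dict.modify (exact)
def pvGroups (keys0 : List String) : PySem.Dict String (List String) :=
  keys0.foldl (fun d k => d.modify (pvPref k) [] (fun l => l ++ [k])) PySem.Dict.empty

def assign_same_values_for_similar_prefixes_alt (dictionary : List (String × Int)) : List (String × Int) :=
  let groups := pvGroups (PySem.Dict.ofList dictionary).keys
  -- 'groups[prefix]' is read with getD []: prefix ranges over groups' own keys, so no KeyError is reachable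
  ((PySem.List.enumerate (PySem.List.sorted groups.keys (fun p => p)) 0).foldl
      (fun d q => (PySem.List.sorted (groups.getD q.2 []) (fun k => k)).foldl
          (fun d k => d.insert k q.1) d)
      PySem.Dict.empty).items

-- ===== PRECONDITION & SPEC =====
def Spec_assign_same_values_for_similar_prefixes (dictionary : List (String × Int)) (out : List (String × Int)) : Prop := out = assign_same_values_for_similar_prefixes_alt dictionary
instance (dictionary : List (String × Int)) (out : List (String × Int)) : Decidable (Spec_assign_same_values_for_similar_prefixes dictionary out) := by unfold Spec_assign_same_values_for_similar_prefixes; infer_instance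

-- ===== CLAIM (what is proved, stated in full; the proofs are below) =====
def Claim_equal_assign_same_values_for_similar_prefixes : Prop := ∀ (dictionary : List (String × Int)), Dom_assign_same_values_for_similar_prefixes dictionary → Spec_assign_same_values_for_similar_prefixes dictionary (assign_same_values_for_similar_prefixes dictionary)

-- ===== LEMMAS AND PROOFS =====

-- the list of distinct prefixes in order of first appearance, starting from D
def pvAcc (D : List String) (ks : List String) : List String :=
  ks.foldl (fun D k => PySem.Set.add D (pvPref k)) D

lemma pvAcc_nil (D : List String) : pvAcc D [] = D := rfl

lemma pvAcc_cons (D : List String) (k : String) (ks : List String) :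
    pvAcc D (k :: ks) = pvAcc (PySem.Set.add D (pvPref k)) ks := rfl

lemma pvAcc_suffix (ks : List String) : ∀ D : List String, ∃ E, pvAcc D ks = D ++ E := by
  induction ks with
  | nil => exact fun D => ⟨[], by simp [pvAcc_nil]⟩
  | cons k ks ih =>
    intro D
    rw [pvAcc_cons]
    by_cases h : pvPref k ∈ D
    · rw [PySem.Set.add_of_mem h]; exact ih D
    · rw [PySem.Set.add_of_not_mem h]
      obtain ⟨E, hE⟩ := ih (D ++ [pvPref k])
      exact ⟨pvPref k :: E, by simpa using hE⟩

-- prefix_to_idx as a function of the distinct-prefix list D ({p: i for i, p in enumerate(D)})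
def pvRank (D : List String) : PySem.Dict String Int :=
  (PySem.List.enumerate D 0).foldl (fun d q => d.insert q.2 q.1) PySem.Dict.empty

lemma pvRank_nil : pvRank [] = PySem.Dict.empty := rfl

lemma pvRank_append (D : List String) (p : String) :
    pvRank (D ++ [p]) = (pvRank D).insert p (D.length : Int) := by
  simp [pvRank, PySem.List.enumerate_append, PySem.List.enumerate]

lemma pvRank_contains (D : List String) (p : String) :
    (pvRank D).contains p = true ↔ p ∈ D := by
  induction D using List.reverseRecOn with
  | nil => simp [pvRank_nil, PySem.Dict.contains_empty]
  | append_singleton D q ih =>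
    rw [pvRank_append, PySem.Dict.contains_insert]
    simp [ih, or_comm]

lemma pvRank_getD (D : List String) (hD : D.Nodup) (p : String) (hp : p ∈ D) :
    (pvRank D).getD p 0 = (D.idxOf p : Int) := by
  induction D using List.reverseRecOn with
  | nil => simp at hp
  | append_singleton D q ih =>
    rw [List.nodup_append] at hD
    have hqD : q ∉ D := fun h => by simpa using hD.2.2 q h
    rw [pvRank_append]
    rcases List.mem_append.1 hp with hpD | hpq
    · have hne : p ≠ q := fun h => hqD (h ▸ hpD)
      rw [PySem.Dict.getD_insert_of_ne _ _ _ hne, ih hD.1 hpD,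
        List.idxOf_append, if_pos hpD]
    · have hpq : p = q := by simpa using hpq
      subst hpq
      rw [PySem.Dict.getD_insert_self, List.idxOf_append, if_neg hqD]
      simp

-- the invariant of A's loop: starting from the rank dict of D, folding pvStepA over ks yields
-- the rank dict of pvAcc D ks, appends one output item per key, and keeps next_idx = length
lemma foldA (ks : List String) : ∀ (D : List String) (nd : PySem.Dict String Int),
    D.Nodup → ks.Nodup → (∀ k ∈ ks, nd.contains k = false) →
    (ks.foldl pvStepA (pvRank D, nd, (D.length : Int))).2.1.items =
      nd.items ++ ks.map (fun k => (k, ((pvAcc D ks).idxOf (pvPref k) : Int))) := by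
  induction ks with
  | nil => intro D nd _ _ _; simp [pvAcc_nil]
  | cons k ks ih =>
    intro D nd hD hks hfresh
    have hkfresh : nd.contains k = false := hfresh k (by simp)
    have hksn : ks.Nodup := (List.nodup_cons.1 hks).2
    have hknotin : k ∉ ks := (List.nodup_cons.1 hks).1
    rw [List.foldl_cons]
    by_cases hp : pvPref k ∈ D
    · have hc : (pvRank D).contains (pvPref k) = true := (pvRank_contains D _).2 hp
      have hstep : pvStepA (pvRank D, nd, (D.length : Int)) k =
          (pvRank D, nd.insert k ((pvRank D).getD (pvPref k) 0), (D.length : Int)) := by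
        simp [pvStepA, hc]
      rw [hstep, ih D _ hD hksn (by
        intro k' hk'
        rw [PySem.Dict.contains_insert]
        have : k' ≠ k := fun h => hknotin (h ▸ hk')
        simp [this, hfresh k' (by simp [hk'])])]
      rw [PySem.Dict.items_insert_of_not_contains _ _ hkfresh]
      rw [pvRank_getD D hD _ hp]
      have hacc : pvAcc D (k :: ks) = pvAcc D ks := by
        rw [pvAcc_cons, PySem.Set.add_of_mem hp]
      obtain ⟨E, hE⟩ := pvAcc_suffix ks D
      have hidx : (pvAcc D ks).idxOf (pvPref k) = D.idxOf (pvPref k) := by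
        rw [hE, List.idxOf_append, if_pos hp]
      simp [hacc, hidx]
    · have hc : (pvRank D).contains (pvPref k) = false := by
        rw [← Bool.not_eq_true, pvRank_contains]; exact hp
      have hstep : pvStepA (pvRank D, nd, (D.length : Int)) k =
          (pvRank (D ++ [pvPref k]),
           nd.insert k ((D.length : Nat) : Int),
           ((D ++ [pvPref k]).length : Int)) := by
        simp only [pvStepA, hc]
        rw [pvRank_append]
        simp [PySem.Dict.getD_insert_self]
      rw [hstep, ih (D ++ [pvPref k]) _ (by
        rw [List.nodup_append]
        exact ⟨hD, List.nodup_singleton _, fun a ha b hb => by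
          simp at hb; subst hb; exact fun h => hp (h ▸ ha)⟩) hksn (by
        intro k' hk'
        rw [PySem.Dict.contains_insert]
        have : k' ≠ k := fun h => hknotin (h ▸ hk')
        simp [this, hfresh k' (by simp [hk'])])]
      rw [PySem.Dict.items_insert_of_not_contains _ _ hkfresh]
      have hacc : pvAcc D (k :: ks) = pvAcc (D ++ [pvPref k]) ks := by
        rw [pvAcc_cons, PySem.Set.add_of_not_mem hp]
      obtain ⟨E, hE⟩ := pvAcc_suffix ks (D ++ [pvPref k])
      have hidx : (pvAcc (D ++ [pvPref k]) ks).idxOf (pvPref k) = D.length := by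
        rw [hE, List.append_assoc, List.idxOf_append, if_neg hp, List.idxOf_append]
        simp
      simp [hacc, hidx]

-- (pvPref k).toList is take 2 of k.toList
lemma pvPref_toList (k : String) : (pvPref k).toList = k.toList.take 2 := by
  rw [pvPref, PySem.Str.toList_slice, PySem.Chars.slice_eq_listSlice,
    PySem.List.slice_to _ (by norm_num)]
  rfl

-- lexicographic order: truncating both lists cannot create a new strict inequality
lemma take_lex {n : ℕ} : ∀ {l₁ l₂ : List Char},
    List.Lex (· < ·) (l₁.take n) (l₂.take n) → List.Lex (· < ·) l₁ l₂ := by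
  induction n with
  | zero => intro l₁ l₂ h; rw [List.take_zero, List.take_zero] at h; cases h
  | succ n ih =>
    intro l₁ l₂ h
    cases l₂ with
    | nil => rw [List.take_nil] at h; exact absurd h List.not_lex_nil
    | cons b t₂ =>
      cases l₁ with
      | nil => exact List.Lex.nil
      | cons a t₁ =>
        simp only [List.take_succ_cons] at h
        cases h with
        | rel hr => exact List.Lex.rel hr
        | cons ht => exact List.Lex.cons (ih ht)

-- 2-char truncation is monotone for Python's (= Lean's) string order
lemma pvPref_mono {k₁ k₂ : String} (h : k₁ ≤ k₂) : pvPref k₁ ≤ pvPref k₂ := by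
  by_contra hc
  have hlt : pvPref k₂ < pvPref k₁ := not_le.mp hc
  have h2 : List.Lex (· < ·) (pvPref k₂).toList (pvPref k₁).toList :=
    (List.lt_iff_lex_lt _ _).mp (String.lt_iff_toList_lt.mp hlt)
  rw [pvPref_toList, pvPref_toList] at h2
  have h3 : k₂ < k₁ :=
    String.lt_iff_toList_lt.mpr ((List.lt_iff_lex_lt _ _).mpr (take_lex h2))
  exact absurd h (not_le.mpr h3)

-- PySem.Set.ofList keeps a sublist of its argument
lemma foldl_add_sublist (xs : List String) : ∀ s : List String,
    ∃ E, List.foldl PySem.Set.add s xs = s ++ E ∧ E.Sublist xs := by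
  induction xs with
  | nil => exact fun s => ⟨[], by simp⟩
  | cons x xs ih =>
    intro s
    by_cases h : x ∈ s
    · obtain ⟨E, hE, hsub⟩ := ih s
      exact ⟨E, by simpa [PySem.Set.add_of_mem h] using hE, hsub.cons _⟩
    · obtain ⟨E, hE, hsub⟩ := ih (s ++ [x])
      exact ⟨x :: E, by simpa [PySem.Set.add_of_not_mem h] using hE,
        (hsub.cons₂ _)⟩

lemma ofList_sublist (xs : List String) : (PySem.Set.ofList xs).Sublist xs := by
  rw [PySem.Set.ofList_eq_foldl]
  obtain ⟨E, hE, hsub⟩ := foldl_add_sublist xs []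
  simpa [hE] using hsub

-- pairwise ≤ plus no duplicates is pairwise <
lemma pv_pairwise_lt_of_le {l : List String} (h : l.Pairwise (· ≤ ·)) (hnd : l.Nodup) :
    l.Pairwise (· < ·) :=
  (h.and hnd).imp (fun hab => lt_of_le_of_ne hab.1 hab.2)

-- a strictly sorted list is determined by its members
lemma pv_eq_of_pairwise_lt : ∀ {l₁ l₂ : List String}, l₁.Pairwise (· < ·) →
    l₂.Pairwise (· < ·) → (∀ x, x ∈ l₁ ↔ x ∈ l₂) → l₁ = l₂ := by
  intro l₁
  induction l₁ with
  | nil =>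
    intro l₂ _ _ hm
    cases l₂ with
    | nil => rfl
    | cons b t₂ => exact absurd ((hm b).2 (by simp)) (by simp)
  | cons a t₁ ih =>
    intro l₂ h₁ h₂ hm
    cases l₂ with
    | nil => exact absurd ((hm a).1 (by simp)) (by simp)
    | cons b t₂ =>
      have hab : a = b := by
        rcases (by simpa using (hm a).1 (by simp) : a = b ∨ a ∈ t₂) with h | ha2
        · exact h
        rcases (by simpa using (hm b).2 (by simp) : b = a ∨ b ∈ t₁) with h | hb1
        · exact h.symm
        exact absurd ((List.pairwise_cons.1 h₂).1 a ha2)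
          (not_lt.2 (le_of_lt ((List.pairwise_cons.1 h₁).1 b hb1)))
      subst hab
      have ht : t₁ = t₂ := by
        refine ih (List.pairwise_cons.1 h₁).2 (List.pairwise_cons.1 h₂).2 (fun x => ⟨?_, ?_⟩)
        · intro hx
          have hax : a < x := (List.pairwise_cons.1 h₁).1 x hx
          rcases (by simpa using (hm x).1 (by simp [hx]) : x = a ∨ x ∈ t₂) with h | h
          · exact absurd (h ▸ hax) (lt_irrefl a)
          · exact h
        · intro hx
          have hax : a < x := (List.pairwise_cons.1 h₂).1 x hx
          rcases (by simpa using (hm x).2 (by simp [hx]) : x = a ∨ x ∈ t₁) with h | h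
          · exact absurd (h ▸ hax) (lt_irrefl a)
          · exact h
      rw [ht]

-- flatMap of per-prefix buckets is strictly sorted when the prefixes are
lemma pv_pairwise_flatMap (g : String → List String) : ∀ P : List String,
    P.Pairwise (· < ·) → (∀ p ∈ P, (g p).Pairwise (· < ·)) →
    (∀ p ∈ P, ∀ k ∈ g p, pvPref k = p) → (P.flatMap g).Pairwise (· < ·) := by
  intro P
  induction P with
  | nil => intro _ _ _; simp
  | cons p P ih =>
    intro hP hg hpref
    rw [List.flatMap_cons, List.pairwise_append]
    refine ⟨hg p (by simp), ih (List.pairwise_cons.1 hP).2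
      (fun q hq => hg q (by simp [hq])) (fun q hq => hpref q (by simp [hq])), ?_⟩
    intro x hx y hy
    obtain ⟨q, hq, hyq⟩ := List.mem_flatMap.1 hy
    have hpq : p < q := (List.pairwise_cons.1 hP).1 q hq
    have hpx : pvPref x = p := hpref p (by simp) x hx
    have hpy : pvPref y = q := hpref q (by simp [hq]) y hyq
    by_contra hc
    have : pvPref y ≤ pvPref x := pvPref_mono (not_lt.1 hc)
    rw [hpx, hpy] at this
    exact absurd hpq (not_lt.2 this)

-- keys of the grouping dict = distinct prefixes in first-appearance order
lemma pvGroups_keys (keys0 : List String) :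
    (pvGroups keys0).keys = PySem.Set.ofList (keys0.map pvPref) := by
  rw [pvGroups, PySem.Dict.keys_foldl_modify_key, PySem.Dict.keys_empty,
    PySem.Set.ofList_eq_foldl, PySem.Set.update, List.foldl_map]

-- each bucket is the filter of the original keys by that prefix, in order
lemma pvGroups_getD (keys0 : List String) (p : String) :
    (pvGroups keys0).getD p [] = keys0.filter (fun k => pvPref k == p) := by
  have h : pvGroups keys0 =
      (keys0.map (fun k => (pvPref k, k))).foldl
        (fun d q => d.modify q.1 [] (fun l => l ++ [q.2])) PySem.Dict.empty := by
    rw [pvGroups, List.foldl_map]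
  rw [h, PySem.Dict.getD_foldl_modify_append, PySem.Dict.getD_empty]
  rw [List.filter_map, List.map_map]
  simp [Function.comp_def]

-- the enumerate loop flattened, with the index expressed as idxOf
lemma pv_enum_flatMap (g : String → List String) : ∀ (P : List String), P.Nodup → ∀ s : Int,
    (PySem.List.enumerate P s).flatMap (fun q => (g q.2).map (fun k => (k, q.1)))
      = P.flatMap (fun p => (g p).map (fun k => (k, s + (P.idxOf p : Int)))) := by
  intro P
  induction P with
  | nil => intro _ s; simp [PySem.List.enumerate_nil]
  | cons p P ih =>
    intro hnd s
    rw [PySem.List.enumerate_cons, List.flatMap_cons, List.flatMap_cons,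
      ih (List.nodup_cons.1 hnd).2 (s + 1)]
    have hp : p ∉ P := (List.nodup_cons.1 hnd).1
    congr 1
    · simp [List.idxOf_cons_self]
    · refine List.flatMap_congr (fun q hq => ?_)
      have hqp : q ≠ p := fun h => hp (h ▸ hq)
      have : (p :: P).idxOf q = P.idxOf q + 1 := by
        have hne : (p == q) = false := by simp [Ne.symm hqp]
        simp [List.idxOf_cons, hne]
      rw [this]
      refine List.map_congr_left (fun k _ => ?_)
      push_cast
      ring_nf

-- ===== VERDICT (by name: the statement is the Claim_ definition above) =====
theorem assign_same_values_for_similar_prefixes_spec : Claim_equal_assign_same_values_for_similar_prefixes := by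
  intro dictionary _dom
  unfold Spec_assign_same_values_for_similar_prefixes
  simp only [assign_same_values_for_similar_prefixes, assign_same_values_for_similar_prefixes_alt]
  set keys0 := (PySem.Dict.ofList dictionary).keys with hkeys0_def
  have hkeys0nd : keys0.Nodup := PySem.Dict.nodup_keys_ofList dictionary
  set ks := PySem.List.sorted keys0 (fun k => k) with hks_def
  have hperm : ks.Perm keys0 := PySem.List.sorted_perm keys0 (fun k => k) false
  have hksnd : ks.Nodup := (hperm.nodup_iff).2 hkeys0nd
  have hkspw : ks.Pairwise (· ≤ ·) := PySem.List.sorted_pairwise keys0 (fun k => k)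
  have hkslt : ks.Pairwise (· < ·) := pv_pairwise_lt_of_le hkspw hksnd
  -- A's side via the loop invariant
  have hA : ((ks.foldl pvStepA (PySem.Dict.empty, PySem.Dict.empty, 0)).2.1).items =
      ks.map (fun k => (k, ((pvAcc [] ks).idxOf (pvPref k) : Int))) := by
    have := foldA ks [] PySem.Dict.empty (by simp) hksnd (by simp [PySem.Dict.contains_empty])
    simpa [pvRank_nil] using this
  set Q := pvAcc [] ks with hQ_def
  have haccof : Q = PySem.Set.ofList (ks.map pvPref) := by
    rw [hQ_def, PySem.Set.ofList_eq_foldl, pvAcc, ← List.foldl_map (f := pvPref) (g := PySem.Set.add)]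
  have hQnd : Q.Nodup := by rw [haccof]; exact PySem.Set.nodup_ofList _
  have hQpw : Q.Pairwise (· ≤ ·) := by
    rw [haccof]
    exact List.Pairwise.sublist (ofList_sublist _)
      (List.Pairwise.map pvPref (fun _ _ hab => pvPref_mono hab) hkspw)
  have hQlt : Q.Pairwise (· < ·) := pv_pairwise_lt_of_le hQpw hQnd
  have hQmem : ∀ p, p ∈ Q ↔ ∃ k ∈ keys0, pvPref k = p := by
    intro p
    rw [haccof, PySem.Set.mem_ofList, List.mem_map]
    constructor
    · rintro ⟨k, hk, hkp⟩; exact ⟨k, hperm.mem_iff.1 hk, hkp⟩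
    · rintro ⟨k, hk, hkp⟩; exact ⟨k, hperm.mem_iff.2 hk, hkp⟩
  -- B's sorted prefix list IS Q (first-appearance over sorted keys = sorted distinct prefixes)
  have hP : PySem.List.sorted (pvGroups keys0).keys (fun p => p) = Q := by
    have hpermQ : Q.Perm (pvGroups keys0).keys := by
      rw [pvGroups_keys]
      refine (List.perm_ext_iff_of_nodup hQnd (PySem.Set.nodup_ofList _)).2 (fun p => ?_)
      rw [hQmem, PySem.Set.mem_ofList, List.mem_map]
    exact PySem.List.sorted_id_eq_of_perm_of_pairwise _ _ hpermQ hQpw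
  rw [hP]
  -- the sorted buckets, as a function of the prefix
  set g : String → List String :=
    fun p => PySem.List.sorted (keys0.filter (fun k => pvPref k == p)) (fun k => k) with hg_def
  have hgetD : ∀ q : Int × String,
      PySem.List.sorted ((pvGroups keys0).getD q.2 []) (fun k => k) = g q.2 := by
    intro q; rw [pvGroups_getD]
  have hgpref : ∀ p ∈ Q, ∀ k ∈ g p, pvPref k = p := by
    intro p _ k hk
    have := (PySem.List.sorted_perm _ (fun k => k) false).mem_iff.1 hk
    simpa using (List.mem_filter.1 this).2
  have hglt : ∀ p ∈ Q, (g p).Pairwise (· < ·) := by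
    intro p _
    refine pv_pairwise_lt_of_le (PySem.List.sorted_pairwise _ (fun k => k)) ?_
    exact ((PySem.List.sorted_perm _ (fun k => k) false).nodup_iff).2 (hkeys0nd.filter _)
  -- the concatenation of the sorted buckets in prefix order is the globally sorted key list
  have hflat : Q.flatMap g = ks := by
    refine pv_eq_of_pairwise_lt (pv_pairwise_flatMap g Q hQlt hglt hgpref) hkslt (fun x => ?_)
    rw [List.mem_flatMap, hperm.mem_iff]
    constructor
    · rintro ⟨p, hp, hx⟩
      have := (PySem.List.sorted_perm _ (fun k => k) false).mem_iff.1 hx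
      exact (List.mem_filter.1 this).1
    · intro hx
      refine ⟨pvPref x, (hQmem _).2 ⟨x, hx, rfl⟩, ?_⟩
      exact (PySem.List.sorted_perm _ (fun k => k) false).mem_iff.2
        (List.mem_filter.2 ⟨hx, by simp⟩)
  -- flatten B's double loop into a single insert loop over the key/index pairs
  have hBfold : ∀ d : PySem.Dict String Int,
      (PySem.List.enumerate Q 0).foldl
        (fun d q => (PySem.List.sorted ((pvGroups keys0).getD q.2 []) (fun k => k)).foldl
            (fun d k => d.insert k q.1) d) d
      = ((PySem.List.enumerate Q 0).flatMap
            (fun q => (g q.2).map (fun k => (k, q.1)))).foldl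
          (fun d r => d.insert r.1 r.2) d := by
    intro d
    rw [List.foldl_flatMap]
    have hfun : (fun (d : PySem.Dict String Int) (q : Int × String) =>
        (PySem.List.sorted ((pvGroups keys0).getD q.2 []) (fun k => k)).foldl
          (fun d k => d.insert k q.1) d)
      = fun d q => ((g q.2).map (fun k => (k, q.1))).foldl (fun d r => d.insert r.1 r.2) d := by
      funext d q
      rw [hgetD q, List.foldl_map]
    rw [hfun]
  set pairs := (PySem.List.enumerate Q 0).flatMap (fun q => (g q.2).map (fun k => (k, q.1)))
    with hpairs_def
  -- the pairs are exactly B's keys with their prefix ranks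
  have hpairs : pairs = ks.map (fun k => (k, (Q.idxOf (pvPref k) : Int))) := by
    rw [hpairs_def, pv_enum_flatMap g Q hQnd 0]
    calc Q.flatMap (fun p => (g p).map (fun k => (k, (0 : Int) + (Q.idxOf p : Int))))
        = Q.flatMap (fun p => (g p).map (fun k => (k, (Q.idxOf (pvPref k) : Int)))) := by
          refine List.flatMap_congr (fun p hp => ?_)
          refine List.map_congr_left (fun k hk => ?_)
          rw [hgpref p hp k hk]
          norm_num
      _ = (Q.flatMap g).map (fun k => (k, (Q.idxOf (pvPref k) : Int))) := by
          rw [List.map_flatMap]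
      _ = ks.map (fun k => (k, (Q.idxOf (pvPref k) : Int))) := by rw [hflat]
  -- the insert loop over fresh distinct keys appends exactly the pairs
  have hfst : pairs.map Prod.fst = ks := by
    rw [hpairs, List.map_map]
    simp [Function.comp_def]
  have hitems : (pairs.foldl (fun d r => d.insert r.1 r.2) PySem.Dict.empty).items = pairs := by
    have := PySem.Dict.items_foldl_insert_fresh (l := pairs) (k := Prod.fst) (v := Prod.snd)
      (d := PySem.Dict.empty) (by simp [PySem.Dict.contains_empty]) (by rw [hfst]; exact hksnd)
    simpa using this
  rw [hA, hBfold, hitems, hpairs]
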